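-- pv_equiv track=rewrite | github.com/NarenOO3/volta_multi_robot_simulation | scripts/robots_launch_generator.py | anticlockwise_spiral
-- ===== SOURCE A (Python) =====
-- def anticlockwise_spiral(n):
--     if n <= 0:
--         return []
--
--     x, y = 0, 0
--     dx, dy = 0, -1
--     result = []
--
--     for _ in range(n):
--         result.append((x, y))
--         if x == y or (x < 0 and x == -y) or (x > 0 and x == 1 - y):
--             dx, dy = -dy, dx
--         x, y = x + dx, y + dy
--
--     return result
-- ===== SOURCE B (Python) =====
-- def anticlockwise_spiral(n):
--     if n <= 0:
--         return []
--     dirs = ((1, 0), (0, 1), (-1, 0), (0, -1))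
--     res = [(0, 0)]
--     x = y = 0
--     k, r = 0, 1  # segment index, steps remaining in current segment
--     for _ in range(n - 1):
--         dx, dy = dirs[k % 4]
--         x += dx
--         y += dy
--         res.append((x, y))
--         r -= 1
--         if r == 0:
--             k += 1
--             r = k // 2 + 1
--     return res
-- ===== Notes on version B (the rewrite author's own statement) =====
-- stated objective: alternative
-- what changed: B emits the spiral as straight segments with the fixed run-length schedule 1,1,2,2,3,3,... (segment index + steps-remaining counter) instead of testing A's diagonal/boundary coordinate condition at every point to decide when to turn.
import Mathlib
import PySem

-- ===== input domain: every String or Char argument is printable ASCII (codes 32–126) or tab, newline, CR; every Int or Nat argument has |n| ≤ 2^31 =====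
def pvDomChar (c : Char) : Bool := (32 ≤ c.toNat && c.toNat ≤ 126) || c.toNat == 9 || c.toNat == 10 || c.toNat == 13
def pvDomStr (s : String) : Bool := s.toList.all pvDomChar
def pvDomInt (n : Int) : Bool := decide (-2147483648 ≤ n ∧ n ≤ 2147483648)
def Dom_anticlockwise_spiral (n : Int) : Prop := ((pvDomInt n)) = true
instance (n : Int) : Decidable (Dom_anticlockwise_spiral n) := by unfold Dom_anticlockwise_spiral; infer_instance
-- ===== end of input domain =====

-- B replaces A's per-point turn-condition test by emitting straight segments with the
-- run-length schedule 1,1,2,2,3,3,… (alternative decomposition, same O(n) cost).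

-- ===== PORT A =====
-- the loop body of A: append (x,y), maybe rotate the direction, move
def aGo : Nat → Int → Int → Int → Int → List (Int × Int) → List (Int × Int)
  | 0, _, _, _, _, result => result
  | Nat.succ m, x, y, dx, dy, result =>
    let result := result ++ [(x, y)]
    let p : Int × Int :=
      if x = y ∨ (x < 0 ∧ x = -y) ∨ (x > 0 ∧ x = 1 - y) then (-dy, dx) else (dx, dy)
    aGo m (x + p.1) (y + p.2) p.1 p.2 result

def anticlockwise_spiral (n : Int) : List (Int × Int) :=
  if n ≤ 0 then [] else aGo n.toNat 0 0 0 (-1) []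

-- ===== PORT B =====
-- dirs[k % 4] from Source B
def bDir (k : Nat) : Int × Int :=
  match k % 4 with
  | 0 => (1, 0)
  | 1 => (0, 1)
  | 2 => (-1, 0)
  | _ => (0, -1)

-- the loop body of B: move one step along segment k (r steps remaining in it), emit the point
def bGo : Nat → Int → Int → Nat → Nat → List (Int × Int)
  | 0, _, _, _, _ => []
  | Nat.succ m, x, y, k, r =>
    let d := bDir k
    let x' := x + d.1
    let y' := y + d.2
    if r = 1 then (x', y') :: bGo m x' y' (k + 1) ((k + 1) / 2 + 1)
    else (x', y') :: bGo m x' y' k (r - 1)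

def anticlockwise_spiral_alt (n : Int) : List (Int × Int) :=
  if n ≤ 0 then [] else (0, 0) :: bGo (n - 1).toNat 0 0 0 1

-- ===== PRECONDITION & SPEC =====
def Spec_anticlockwise_spiral (n : Int) (out : List (Int × Int)) : Prop := out = anticlockwise_spiral_alt n
instance (n : Int) (out : List (Int × Int)) : Decidable (Spec_anticlockwise_spiral n out) := by unfold Spec_anticlockwise_spiral; infer_instance

-- ===== CLAIM (what is proved, stated in full; the proofs are below) =====
def Claim_equal_anticlockwise_spiral : Prop := ∀ (n : Int), Dom_anticlockwise_spiral n → Spec_anticlockwise_spiral n (anticlockwise_spiral n)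

-- ===== LEMMAS AND PROOFS =====

-- start of segment k of the spiral
def segSx (k : Nat) : Int :=
  if k % 4 = 0 then -(k / 4 : Int)
  else if k % 4 = 3 then -(k / 4 : Int) - 1
  else (k / 4 : Int) + 1
def segSy (k : Nat) : Int :=
  if k % 4 ≤ 1 then -(k / 4 : Int)
  else (k / 4 : Int) + 1

-- invariant: (x,y) lies (k/2+1-r) steps along segment k, with 1 ≤ r ≤ run length k/2+1
def SpInv (x y : Int) (k r : Nat) : Prop :=
  1 ≤ r ∧ r ≤ k / 2 + 1 ∧
  x = segSx k + ((k / 2 + 1 - r : Nat) : Int) * (bDir k).1 ∧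
  y = segSy k + ((k / 2 + 1 - r : Nat) : Int) * (bDir k).2

theorem bDir_cases (k : Nat) :
    (k % 4 = 0 ∧ bDir k = (1, 0)) ∨ (k % 4 = 1 ∧ bDir k = (0, 1)) ∨
    (k % 4 = 2 ∧ bDir k = (-1, 0)) ∨ (k % 4 = 3 ∧ bDir k = (0, -1)) := by
  have h : k % 4 = 0 ∨ k % 4 = 1 ∨ k % 4 = 2 ∨ k % 4 = 3 := by omega
  rcases h with h | h | h | h <;> simp [bDir, h]

theorem spInv_step (x y : Int) (k r : Nat) (h : SpInv x y k r) (hr : r ≠ 1) :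
    SpInv (x + (bDir k).1) (y + (bDir k).2) k (r - 1) := by
  obtain ⟨h1, h2, hx, hy⟩ := h
  refine ⟨by omega, by omega, ?_, ?_⟩ <;>
  · rcases bDir_cases k with ⟨_, hd⟩ | ⟨_, hd⟩ | ⟨_, hd⟩ | ⟨_, hd⟩ <;>
      simp [hd] at hx hy ⊢ <;> omega

theorem spInv_next (x y : Int) (k : Nat) (h : SpInv x y k 1) :
    SpInv (x + (bDir k).1) (y + (bDir k).2) (k + 1) ((k + 1) / 2 + 1) := by
  obtain ⟨_, _, hx, hy⟩ := h
  refine ⟨by omega, by omega, ?_, ?_⟩ <;>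
  · rcases bDir_cases k with ⟨hm, hd⟩ | ⟨hm, hd⟩ | ⟨hm, hd⟩ | ⟨hm, hd⟩ <;>
    [ (have hm1 : (k + 1) % 4 = 1 := by omega);
      (have hm1 : (k + 1) % 4 = 2 := by omega);
      (have hm1 : (k + 1) % 4 = 3 := by omega);
      (have hm1 : (k + 1) % 4 = 0 := by omega)] <;>
      simp [bDir, hm, segSx, segSy, hm1] at hx hy ⊢ <;> omega

-- A's turn condition fires at the new point exactly when the segment is exhausted
theorem cond_iff (x y : Int) (k r : Nat) (h : SpInv x y k r) :
    ((x + (bDir k).1 = y + (bDir k).2) ∨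
      (x + (bDir k).1 < 0 ∧ x + (bDir k).1 = -(y + (bDir k).2)) ∨
      (x + (bDir k).1 > 0 ∧ x + (bDir k).1 = 1 - (y + (bDir k).2))) ↔ r = 1 := by
  obtain ⟨h1, h2, hx, hy⟩ := h
  rcases bDir_cases k with ⟨hm, hd⟩ | ⟨hm, hd⟩ | ⟨hm, hd⟩ | ⟨hm, hd⟩ <;>
    simp [hd, segSx, segSy, hm] at hx hy ⊢ <;> omega

-- rotating (dx,dy) ↦ (-dy,dx) advances the direction cycle
theorem rot_dir (k : Nat) : (-(bDir k).2, (bDir k).1) = bDir (k + 1) := by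
  rcases bDir_cases k with ⟨hm, hd⟩ | ⟨hm, hd⟩ | ⟨hm, hd⟩ | ⟨hm, hd⟩ <;>
  [ (have hm1 : (k + 1) % 4 = 1 := by omega);
    (have hm1 : (k + 1) % 4 = 2 := by omega);
    (have hm1 : (k + 1) % 4 = 3 := by omega);
    (have hm1 : (k + 1) % 4 = 0 := by omega)] <;>
    simp [bDir, hm, hm1]

theorem aGo_acc (m : Nat) : ∀ (x y dx dy : Int) (res : List (Int × Int)),
    aGo m x y dx dy res = res ++ aGo m x y dx dy [] := by
  induction m with
  | zero => intro x y dx dy res; simp [aGo]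
  | succ m ih =>
    intro x y dx dy res
    simp only [aGo, List.nil_append]
    rw [ih _ _ _ _ (res ++ [(x, y)]), ih _ _ _ _ [(x, y)]]
    simp

theorem aGo_cons (m : Nat) (x y dx dy : Int) :
    aGo (m + 1) x y dx dy [] =
      (x, y) :: aGo m
        (x + (if x = y ∨ (x < 0 ∧ x = -y) ∨ (x > 0 ∧ x = 1 - y) then ((-dy, dx) : Int × Int) else (dx, dy)).1)
        (y + (if x = y ∨ (x < 0 ∧ x = -y) ∨ (x > 0 ∧ x = 1 - y) then ((-dy, dx) : Int × Int) else (dx, dy)).2)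
        (if x = y ∨ (x < 0 ∧ x = -y) ∨ (x > 0 ∧ x = 1 - y) then ((-dy, dx) : Int × Int) else (dx, dy)).1
        (if x = y ∨ (x < 0 ∧ x = -y) ∨ (x > 0 ∧ x = 1 - y) then ((-dy, dx) : Int × Int) else (dx, dy)).2 [] := by
  simp only [aGo, List.nil_append]
  rw [aGo_acc m _ _ _ _ [(x, y)]]
  simp

theorem bisim (m : Nat) : ∀ (x y dx dy : Int) (k r : Nat), SpInv x y k r →
    (if x = y ∨ (x < 0 ∧ x = -y) ∨ (x > 0 ∧ x = 1 - y) then ((-dy, dx) : Int × Int) else (dx, dy))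
      = bDir k →
    aGo (m + 1) x y dx dy [] = (x, y) :: bGo m x y k r := by
  induction m with
  | zero =>
    intro x y dx dy k r _ _
    simp [aGo, bGo]
  | succ m ih =>
    intro x y dx dy k r hInv hturn
    have hstep : aGo (m + 2) x y dx dy [] =
        (x, y) :: aGo (m + 1) (x + (bDir k).1) (y + (bDir k).2) (bDir k).1 (bDir k).2 [] := by
      rw [aGo_cons (m + 1) x y dx dy, hturn]
    rw [hstep]
    by_cases hr : r = 1
    · subst hr
      have hnext := spInv_next x y k hInv
      have hcond : (x + (bDir k).1 = y + (bDir k).2) ∨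
          (x + (bDir k).1 < 0 ∧ x + (bDir k).1 = -(y + (bDir k).2)) ∨
          (x + (bDir k).1 > 0 ∧ x + (bDir k).1 = 1 - (y + (bDir k).2)) :=
        (cond_iff x y k 1 hInv).2 rfl
      have := ih (x + (bDir k).1) (y + (bDir k).2) (bDir k).1 (bDir k).2 (k + 1)
        ((k + 1) / 2 + 1) hnext (by rw [if_pos hcond]; exact rot_dir k)
      rw [this]
      simp [bGo]
    · have hnext := spInv_step x y k r hInv hr
      have hcond : ¬ ((x + (bDir k).1 = y + (bDir k).2) ∨
          (x + (bDir k).1 < 0 ∧ x + (bDir k).1 = -(y + (bDir k).2)) ∨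
          (x + (bDir k).1 > 0 ∧ x + (bDir k).1 = 1 - (y + (bDir k).2))) := by
        intro hc; exact hr ((cond_iff x y k r hInv).1 hc)
      have := ih (x + (bDir k).1) (y + (bDir k).2) (bDir k).1 (bDir k).2 k (r - 1) hnext
        (by rw [if_neg hcond])
      rw [this]
      simp [bGo, hr]

-- ===== VERDICT (by name: the statement is the Claim_ definition above) =====
theorem anticlockwise_spiral_spec : Claim_equal_anticlockwise_spiral := by
  intro n _
  unfold Spec_anticlockwise_spiral anticlockwise_spiral anticlockwise_spiral_alt
  by_cases h : n ≤ 0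
  · simp [h]
  · rw [if_neg h, if_neg h]
    have hn : n.toNat = (n - 1).toNat + 1 := by omega
    rw [hn]
    have hInv : SpInv 0 0 0 1 := by
      refine ⟨le_refl 1, by omega, ?_, ?_⟩ <;> simp [segSx, segSy, bDir]
    have hturn : (if (0 : Int) = 0 ∨ ((0 : Int) < 0 ∧ (0 : Int) = -0) ∨
        ((0 : Int) > 0 ∧ (0 : Int) = 1 - 0) then ((-(-1 : Int), (0 : Int))) else ((0 : Int), (-1 : Int)))
        = bDir 0 := by
      simp [bDir]
    exact bisim (n - 1).toNat 0 0 0 (-1) 0 1 hInv hturn
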